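-- pv_equiv track=rewrite | github.com/orenovadia/euler | e215_2.py | calc_ways
-- ===== SOURCE A (Python) =====
-- def calc_ways(adjacency, h):
--     """
--     We use DP to calculate all possible walls.
--     We build the wall from bottom to top where (Li is one type of brick layer):
--     f(height, Li) = sum of f(height - 1, Lj)
--                     for all Lj that can be placed under Li
--
--     At the end we sum all f(h, Li) for all i
--     """
--     # current_floor[i] is number of ways to build a wall of current height
--     # with layer `i` at the top, we start with the first floor (one way to build it).
--     current_floor = [1 for _ in adjacency]
--
--     for _ in range(1, h):
--         next_floor = [
--             sum(current_floor[other] for other in adjacency[i])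
--             for i in range(len(adjacency))
--         ]
--         current_floor = next_floor
--
--     return sum(current_floor)
-- ===== SOURCE B (Python) =====
-- def calc_ways(adjacency, h):
--     # Matrix exponentiation: the answer is the sum of all entries of M**(h-1),
--     # where M[i][j] counts how often layer j appears in adjacency[i].
--     n = len(adjacency)
--     if h <= 1:
--         return n
--     mat = [[0] * n for _ in range(n)]
--     for i in range(n):
--         for j in adjacency[i]:
--             mat[i][j] += 1
--
--     def mul(p, q):
--         return [[sum(row[k] * q[k][c] for k in range(n)) for c in range(n)]
--                 for row in p]
--
--     result = [[1 if r == c else 0 for c in range(n)] for r in range(n)]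
--     base = mat
--     e = h - 1
--     while e > 0:
--         if e % 2:
--             result = mul(result, base)
--         base = mul(base, base)
--         e //= 2
--     return sum(sum(row) for row in result)
-- ===== Notes on version B (the rewrite author's own statement) =====
-- stated objective: alternative
-- what changed: Replaces A's floor-by-floor DP (h-1 successive vector updates through the adjacency lists) by matrix exponentiation: B builds the n-by-n multiplicity matrix M of the adjacency once and returns the sum of all entries of M^(h-1), computed by binary squaring, so its work is logarithmic in h instead of linear.
import Mathlib
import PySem

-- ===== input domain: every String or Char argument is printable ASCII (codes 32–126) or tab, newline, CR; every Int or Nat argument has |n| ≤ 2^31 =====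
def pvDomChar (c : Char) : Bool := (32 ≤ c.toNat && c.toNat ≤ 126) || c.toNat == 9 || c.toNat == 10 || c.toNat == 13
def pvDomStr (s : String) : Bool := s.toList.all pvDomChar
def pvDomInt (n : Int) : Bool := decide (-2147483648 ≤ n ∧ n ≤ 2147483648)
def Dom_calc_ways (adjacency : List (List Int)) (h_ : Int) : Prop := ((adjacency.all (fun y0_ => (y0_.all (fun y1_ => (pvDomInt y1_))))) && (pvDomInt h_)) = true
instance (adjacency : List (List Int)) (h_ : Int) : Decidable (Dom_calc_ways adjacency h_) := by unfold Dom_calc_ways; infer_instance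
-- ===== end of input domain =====

-- B replaces A's floor-by-floor DP (h-1 vector updates) by matrix exponentiation:
-- the answer is the sum of all entries of M^(h-1), where M[i][j] counts how often
-- layer j appears in adjacency[i]; M^(h-1) is computed by binary squaring. Objective: alternative.

-- ===== PORT A =====
def calc_ways (adjacency : List (List Int)) (h_ : Int) : Int :=
  let current0 : List Int := adjacency.map (fun _ => (1 : Int))
  let finalFloor :=
    (PySem.List.pyRange 1 h_ 1).foldl
      (fun current _ =>
        (List.range adjacency.length).map (fun i : Nat =>
          ((PySem.List.pyGet? adjacency (i : Int)).getD []).foldl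
            (fun s other => s + PySem.List.pyGetD current other 0) 0))
      current0
  finalFloor.foldl (fun acc x => acc + x) 0

-- ===== PORT B =====
-- mat[i][j] += 1 over all i < n, j in adjacency[i] (j indexed Python-style via pySetD/pyGetD;
-- the outer index i comes from range(n) so it is a plain Nat index)
def buildMat (adjacency : List (List Int)) (n : Nat) : List (List Int) :=
  (List.range n).foldl
    (fun m (i : Nat) =>
      ((PySem.List.pyGet? adjacency (i : Int)).getD []).foldl
        (fun m j =>
          m.set i (PySem.List.pySetD (m.getD i [])  j (PySem.List.pyGetD (m.getD i []) j 0 + 1)))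
        m)
    ((List.range n).map (fun _ => List.replicate n 0))

-- mul(p, q): sum(row[k] * q[k][c] for k in range(n)); k, c are Nat indices from range(n),
-- in range at every runtime access, so List.getD is exact there
def mulL (n : Nat) (p q : List (List Int)) : List (List Int) :=
  p.map (fun row =>
    (List.range n).map (fun c =>
      (List.range n).foldl (fun s k => s + row.getD k 0 * (q.getD k []).getD c 0) 0))

def idL (n : Nat) : List (List Int) :=
  (List.range n).map (fun r => (List.range n).map (fun c => if r = c then (1 : Int) else 0))

-- while e > 0: if e % 2: result = mul(result, base); base = mul(base, base); e //= 2
-- (e = h-1 > 0 when the loop is entered, so iterating on e.toNat is exact)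
def powLoop (n : Nat) (res base : List (List Int)) (e : Nat) : List (List Int) :=
  if e = 0 then res
  else powLoop n (if e % 2 = 1 then mulL n res base else res) (mulL n base base) (e / 2)
termination_by e
decreasing_by exact Nat.div_lt_self (Nat.pos_of_ne_zero (by assumption)) (by norm_num)

def calc_ways_alt (adjacency : List (List Int)) (h_ : Int) : Int :=
  let n := adjacency.length
  if h_ ≤ 1 then (n : Int)
  else
    let mat := buildMat adjacency n
    let result := powLoop n (idL n) mat (h_ - 1).toNat
    result.foldl (fun s row => s + row.foldl (fun a x => a + x) 0) 0

-- ===== PRECONDITION & SPEC =====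
-- every adjacency entry is a valid Python index into the layer list
def InRangeAdj (adjacency : List (List Int)) : Prop :=
  ∀ row ∈ adjacency, ∀ j ∈ row, -(adjacency.length : Int) ≤ j ∧ j < adjacency.length

-- Pre_ excludes exactly the inputs where A raises IndexError: h ≥ 2 together with some
-- adjacency entry that is not a valid index into the list of layers (B raises there too).
def Pre_calc_ways (adjacency : List (List Int)) (h_ : Int) : Prop :=
  h_ ≤ 1 ∨ InRangeAdj adjacency

instance (adjacency : List (List Int)) (h_ : Int) : Decidable (Pre_calc_ways adjacency h_) := by
  unfold Pre_calc_ways InRangeAdj; infer_instance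

def pvWitness_calc_ways : List (List Int) × Int := ([[0, 1], [0]], 3)

def Spec_calc_ways (adjacency : List (List Int)) (h_ : Int) (out : Int) : Prop := out = calc_ways_alt adjacency h_
instance (adjacency : List (List Int)) (h_ : Int) (out : Int) : Decidable (Spec_calc_ways adjacency h_ out) := by unfold Spec_calc_ways; infer_instance

-- ===== CLAIM (what is proved, stated in full; the proofs are below) =====
def Claim_equal_calc_ways : Prop := ∀ (adjacency : List (List Int)) (h_ : Int), Dom_calc_ways adjacency h_ → Pre_calc_ways adjacency h_ → Spec_calc_ways adjacency h_ (calc_ways adjacency h_)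

-- ===== LEMMAS AND PROOFS =====

-- f(t, i) from the docstring's recurrence, with Python index semantics on i
def gg (adj : List (List Int)) : Nat → Int → Int
  | 0, _ => 1
  | t + 1, i =>
      ((PySem.List.pyGet? adj i).getD []).foldl (fun s j => s + gg adj t j) 0

-- normalised Python index
def NormI (n : Nat) (j : Int) : Nat := if 0 ≤ j then j.toNat else n - (-j).toNat

lemma pyIdx?_norm (n : Nat) (j : Int) (h1 : -(n : Int) ≤ j) (h2 : j < n) :
    PySem.List.pyIdx? n j = some (NormI n j) := by
  unfold PySem.List.pyIdx? NormI
  split_ifs <;> simp_all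

lemma NormI_lt (n : Nat) (j : Int) (h1 : -(n : Int) ≤ j) (h2 : j < n) : NormI n j < n := by
  unfold NormI; split_ifs <;> omega

lemma pyGet?_norm {α : Type} (xs : List α) (j : Int)
    (h1 : -(xs.length : Int) ≤ j) (h2 : j < xs.length) :
    PySem.List.pyGet? xs j = xs[NormI xs.length j]? := by
  unfold PySem.List.pyGet?
  rw [pyIdx?_norm _ _ h1 h2]
  rfl

lemma gg_norm (adj : List (List Int)) (t : Nat) (j : Int)
    (h1 : -(adj.length : Int) ≤ j) (h2 : j < adj.length) :
    gg adj t j = gg adj t (NormI adj.length j : Int) := by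
  cases t with
  | zero => rfl
  | succ t =>
      show ((PySem.List.pyGet? adj j).getD []).foldl _ 0 =
        ((PySem.List.pyGet? adj (NormI adj.length j : Int)).getD []).foldl _ 0
      rw [pyGet?_norm adj j h1 h2, PySem.List.pyGet?_natCast]

lemma sum_map_range {f : Nat → Int} (n : Nat) :
    ((List.range n).map f).sum = ∑ k ∈ Finset.range n, f k := by
  induction n with
  | zero => simp
  | succ n ih => simp [List.range_succ, Finset.sum_range_succ, ih]

-- ---------- A side ----------

def stepA (adj : List (List Int)) (current : List Int) : List Int :=
  (List.range adj.length).map (fun i : Nat =>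
    ((PySem.List.pyGet? adj (i : Int)).getD []).foldl
      (fun s other => s + PySem.List.pyGetD current other 0) 0)

lemma calc_ways_eq_loop (adj : List (List Int)) (h_ : Int) :
    calc_ways adj h_ =
      ((PySem.List.pyRange 1 h_ 1).foldl (fun cur _ => stepA adj cur)
        (adj.map fun _ => (1 : Int))).foldl (fun acc x => acc + x) 0 := rfl

lemma read_mapgg (adj : List (List Int)) (t : Nat) (j : Int)
    (h1 : -(adj.length : Int) ≤ j) (h2 : j < adj.length) :
    PySem.List.pyGetD ((List.range adj.length).map (fun k : Nat => gg adj t (k : Int))) j 0 =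
      gg adj t j := by
  have hlen : ((List.range adj.length).map (fun k : Nat => gg adj t (k : Int))).length = adj.length := by
    simp
  have hm := NormI_lt adj.length j h1 h2
  unfold PySem.List.pyGetD
  rw [pyGet?_norm _ j (by rw [hlen]; exact h1) (by rw [hlen]; exact h2), hlen]
  rw [List.getElem?_map, List.getElem?_range hm]
  simpa using (gg_norm adj t j h1 h2).symm

lemma stepA_mapgg (adj : List (List Int)) (hR : InRangeAdj adj) (t : Nat) :
    stepA adj ((List.range adj.length).map (fun k : Nat => gg adj t (k : Int))) =
      (List.range adj.length).map (fun k : Nat => gg adj (t + 1) (k : Int)) := by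
  unfold stepA
  apply List.map_congr_left
  intro i hi
  have hi' : i < adj.length := List.mem_range.mp hi
  have hrow : PySem.List.pyGet? adj (i : Int) = some adj[i] := by
    rw [PySem.List.pyGet?_natCast]
    simp [hi']
  show _ = gg adj (t + 1) (i : Int)
  have : gg adj (t + 1) (i : Int) =
      ((PySem.List.pyGet? adj (i : Int)).getD []).foldl (fun s j => s + gg adj t j) 0 := rfl
  rw [this]
  apply PySem.List.foldl_congr_mem
  intro acc x hx
  have hb := hR adj[i] (List.getElem_mem hi') x (by rw [hrow] at hx; simpa using hx)
  rw [read_mapgg adj t x hb.1 hb.2]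

lemma loopA (adj : List (List Int)) (hR : InRangeAdj adj) (l : List Int) :
    ∀ t : Nat,
      l.foldl (fun cur _ => stepA adj cur) ((List.range adj.length).map (fun k : Nat => gg adj t (k : Int))) =
        (List.range adj.length).map (fun k : Nat => gg adj (t + l.length) (k : Int)) := by
  induction l with
  | nil => intro t; simp
  | cons a l ih =>
      intro t
      rw [List.foldl_cons, stepA_mapgg adj hR t, ih (t + 1)]
      have harith : t + 1 + l.length = t + (a :: l).length := by simp; omega
      rw [harith]

lemma init_ones (adj : List (List Int)) :
    adj.map (fun _ => (1 : Int)) = (List.range adj.length).map (fun k : Nat => gg adj 0 (k : Int)) := by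
  have h1 : adj.map (fun _ => (1 : Int)) = List.replicate adj.length 1 := by
    simp [List.map_const']
  have h2 : (List.range adj.length).map (fun k : Nat => gg adj 0 (k : Int)) =
      List.replicate adj.length 1 := by
    have : (fun (k : Nat) => gg adj 0 (k : Int)) = fun _ => (1 : Int) := rfl
    rw [this]
    simp [List.map_const']
  rw [h1, h2]

lemma calc_ways_closed (adj : List (List Int)) (h_ : Int) (hR : InRangeAdj adj) :
    calc_ways adj h_ =
      ∑ k ∈ Finset.range adj.length, gg adj (PySem.List.pyRange 1 h_ 1).length (k : Int) := by
  rw [calc_ways_eq_loop, init_ones, loopA adj hR _ 0]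
  rw [PySem.List.foldl_add _ (fun x => x) 0]
  simp only [List.map_map, zero_add]
  rw [sum_map_range]
  rfl

-- ---------- B side ----------

def toMat (n : Nat) (p : List (List Int)) : Matrix (Fin n) (Fin n) Int :=
  Matrix.of fun i k => (p.getD i []).getD k 0

lemma getD_map_range' {α : Type} [Inhabited α] (f : Nat → α) (n c : Nat) (hc : c < n) (d : α) :
    ((List.range n).map f).getD c d = f c := by
  rw [List.getD_eq_getElem?_getD, List.getElem?_map, List.getElem?_range hc]
  rfl

lemma length_mulL (n : Nat) (p q : List (List Int)) : (mulL n p q).length = p.length := by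
  simp [mulL]

lemma rows_mulL (n : Nat) (p q : List (List Int)) :
    ∀ r ∈ mulL n p q, r.length = n := by
  intro r hr
  simp only [mulL, List.mem_map] at hr
  obtain ⟨row, _, rfl⟩ := hr
  simp

lemma toMat_mulL (n : Nat) (p q : List (List Int)) (hp : p.length = n) :
    toMat n (mulL n p q) = toMat n p * toMat n q := by
  ext i c
  show ((mulL n p q).getD i []).getD c 0 = _
  have hi : (i : Nat) < p.length := by rw [hp]; exact i.isLt
  have hrow : (mulL n p q).getD i [] =
      (List.range n).map (fun c =>
        (List.range n).foldl (fun s k => s + (p.getD i []).getD k 0 * (q.getD k []).getD c 0) 0) := by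
    unfold mulL
    rw [List.getD_eq_getElem?_getD, List.getElem?_map]
    rw [List.getElem?_eq_getElem hi]
    simp [List.getD_eq_getElem?_getD, List.getElem?_eq_getElem hi]
  rw [hrow, getD_map_range' _ n c c.isLt]
  rw [PySem.List.foldl_add _ (fun k => (p.getD i []).getD k 0 * (q.getD k []).getD c 0) 0,
    zero_add, sum_map_range]
  rw [Matrix.mul_apply]
  rw [← Fin.sum_univ_eq_sum_range (fun k => (p.getD (i : Nat) []).getD k 0 * (q.getD k []).getD (c : Nat) 0) n]
  rfl

lemma length_idL (n : Nat) : (idL n).length = n := by simp [idL]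

lemma rows_idL (n : Nat) : ∀ r ∈ idL n, r.length = n := by
  intro r hr
  simp only [idL, List.mem_map] at hr
  obtain ⟨k, _, rfl⟩ := hr
  simp

lemma toMat_idL (n : Nat) : toMat n (idL n) = 1 := by
  ext i c
  show ((idL n).getD i []).getD c 0 = _
  unfold idL
  rw [getD_map_range' _ n i i.isLt, getD_map_range' _ n c c.isLt]
  rw [Matrix.one_apply]
  by_cases h : i = c
  · rw [if_pos h, if_pos (by exact_mod_cast congrArg Fin.val h)]
  · rw [if_neg h, if_neg (fun hv => h (Fin.ext hv))]

lemma toMat_powLoop (n : Nat) : ∀ (e : Nat) (res base : List (List Int)),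
    res.length = n → base.length = n →
    toMat n (powLoop n res base e) = toMat n res * (toMat n base) ^ e := by
  intro e
  induction e using Nat.strong_induction_on with
  | _ e ih =>
      intro res base hres hbase
      unfold powLoop
      by_cases he : e = 0
      · subst he; simp
      · rw [if_neg he]
        have hlt : e / 2 < e := Nat.div_lt_self (Nat.pos_of_ne_zero he) (by norm_num)
        have hres' : (if e % 2 = 1 then mulL n res base else res).length = n := by
          split_ifs
          · rw [length_mulL]; exact hres
          · exact hres
        rw [ih (e / 2) hlt _ _ hres' ((length_mulL n base base).trans hbase)]
        rw [toMat_mulL n base base hbase]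
        set B := toMat n base with hB
        have hsq : (B * B) ^ (e / 2) = B ^ (2 * (e / 2)) := by
          rw [← pow_two, ← pow_mul]
        rcases Nat.mod_two_eq_zero_or_one e with hm | hm
        · rw [if_neg (by omega), hsq]
          have h2 : 2 * (e / 2) = e := by omega
          rw [h2]
        · rw [if_pos hm, toMat_mulL n res base hres, hsq, mul_assoc, ← pow_succ']
          have h2 : 2 * (e / 2) + 1 = e := by omega
          rw [h2]

-- shape of the power loop's result
lemma shape_powLoop (n : Nat) : ∀ (e : Nat) (res base : List (List Int)),
    res.length = n → (∀ r ∈ res, r.length = n) →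
    (powLoop n res base e).length = n ∧ (∀ r ∈ powLoop n res base e, r.length = n) := by
  intro e
  induction e using Nat.strong_induction_on with
  | _ e ih =>
      intro res base hres hrows
      unfold powLoop
      by_cases he : e = 0
      · subst he; simpa using ⟨hres, hrows⟩
      · rw [if_neg he]
        have hlt : e / 2 < e := Nat.div_lt_self (Nat.pos_of_ne_zero he) (by norm_num)
        apply ih (e / 2) hlt
        · split_ifs
          · rw [length_mulL]; exact hres
          · exact hres
        · split_ifs
          · exact rows_mulL n res base
          · exact hrows

-- ---------- building the count matrix ----------

def bump (r : List Int) (j : Int) : List Int :=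
  PySem.List.pySetD r j (PySem.List.pyGetD r j 0 + 1)

def innerStep (i : Nat) (m : List (List Int)) (j : Int) : List (List Int) :=
  m.set i (PySem.List.pySetD (m.getD i []) j (PySem.List.pyGetD (m.getD i []) j 0 + 1))

lemma buildMat_eq (adj : List (List Int)) (n : Nat) :
    buildMat adj n =
      (List.range n).foldl
        (fun m (i : Nat) => ((PySem.List.pyGet? adj (i : Int)).getD []).foldl (innerStep i) m)
        ((List.range n).map (fun _ => List.replicate n 0)) := rfl

lemma length_innerFold (i : Nat) :
    ∀ (row : List Int) (m : List (List Int)), (row.foldl (innerStep i) m).length = m.length := by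
  intro row
  induction row with
  | nil => intro m; rfl
  | cons j row ih =>
      intro m
      rw [List.foldl_cons, ih]
      simp [innerStep]

lemma getD_innerFold (i : Nat) :
    ∀ (row : List Int) (m : List (List Int)), i < m.length → ∀ i' : Nat,
      (row.foldl (innerStep i) m).getD i' [] =
        if i' = i then row.foldl bump (m.getD i []) else m.getD i' [] := by
  intro row
  induction row with
  | nil =>
      intro m _ i'
      by_cases h : i' = i
      · simp [h]
      · simp [h]
  | cons j row ih =>
      intro m hi i'
      rw [List.foldl_cons]
      have hlen : i < (innerStep i m j).length := by simpa [innerStep] using hi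
      rw [ih (innerStep i m j) hlen i']
      have hget_i : (innerStep i m j).getD i [] = bump (m.getD i []) j := by
        simp [innerStep, bump, List.getD_eq_getElem?_getD, hi]
      by_cases h : i' = i
      · rw [if_pos h, if_pos h, hget_i, List.foldl_cons]
      · rw [if_neg h, if_neg h]
        have h2 : i ≠ i' := fun he => h he.symm
        simp [innerStep, List.getD_eq_getElem?_getD, h2]

lemma length_outerFold (adj : List (List Int)) :
    ∀ (l : List Nat) (m : List (List Int)),
      (l.foldl (fun m (t : Nat) => ((PySem.List.pyGet? adj (t : Int)).getD []).foldl (innerStep t) m) m).length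
        = m.length := by
  intro l
  induction l with
  | nil => intro m; rfl
  | cons a l ih =>
      intro m
      rw [List.foldl_cons, ih, length_innerFold]

lemma getD_outerFold (adj : List (List Int)) :
    ∀ (l : List Nat), l.Nodup → ∀ (m : List (List Int)), (∀ t ∈ l, t < m.length) → ∀ i : Nat,
      (l.foldl (fun m (t : Nat) => ((PySem.List.pyGet? adj (t : Int)).getD []).foldl (innerStep t) m) m).getD i []
        = if i ∈ l then ((PySem.List.pyGet? adj (i : Int)).getD []).foldl bump (m.getD i []) else m.getD i [] := by
  intro l
  induction l with
  | nil => intro _ m _ i; simp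
  | cons a l ih =>
      intro hnd m hlt i
      obtain ⟨hna, hnd'⟩ := List.nodup_cons.mp hnd
      have ha : a < m.length := hlt a (List.mem_cons_self ..)
      rw [List.foldl_cons]
      have hlen' : ∀ t ∈ l, t < (((PySem.List.pyGet? adj (a : Int)).getD []).foldl (innerStep a) m).length := by
        intro t ht
        rw [length_innerFold]
        exact hlt t (List.mem_cons_of_mem a ht)
      rw [ih hnd' _ hlen' i]
      by_cases h : i ∈ l
      · rw [if_pos h, if_pos (List.mem_cons_of_mem a h)]
        have hne : i ≠ a := fun he => hna (he ▸ h)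
        rw [getD_innerFold a _ m ha i, if_neg hne]
      · rw [if_neg h]
        rw [getD_innerFold a _ m ha i]
        by_cases he : i = a
        · rw [if_pos he, if_pos (he ▸ List.mem_cons_self ..), he]
        · rw [if_neg he, if_neg (by simp [he, h])]

lemma length_buildMat (adj : List (List Int)) (n : Nat) : (buildMat adj n).length = n := by
  rw [buildMat_eq, length_outerFold]
  simp

lemma getD_buildMat (adj : List (List Int)) (n : Nat) (i : Nat) (hi : i < n) :
    (buildMat adj n).getD i [] =
      ((PySem.List.pyGet? adj (i : Int)).getD []).foldl bump (List.replicate n 0) := by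
  rw [buildMat_eq, getD_outerFold adj (List.range n) (List.nodup_range)
    _ (by intro t ht; simpa using List.mem_range.mp ht) i]
  rw [if_pos (List.mem_range.mpr hi), getD_map_range' _ n i hi]

-- ---------- counting ----------

lemma pySetD_norm (xs : List Int) (j : Int) (v : Int)
    (h1 : -(xs.length : Int) ≤ j) (h2 : j < xs.length) :
    PySem.List.pySetD xs j v = xs.set (NormI xs.length j) v := by
  unfold PySem.List.pySetD PySem.List.pySet?
  rw [pyIdx?_norm _ _ h1 h2]
  rfl

lemma pyGetD_norm (xs : List Int) (j : Int)
    (h1 : -(xs.length : Int) ≤ j) (h2 : j < xs.length) :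
    PySem.List.pyGetD xs j 0 = xs.getD (NormI xs.length j) 0 := by
  unfold PySem.List.pyGetD
  rw [pyGet?_norm _ j h1 h2, List.getD_eq_getElem?_getD]

lemma getD_bumpFold (n : Nat) (k : Nat) :
    ∀ (row : List Int), (∀ j ∈ row, -(n : Int) ≤ j ∧ j < n) →
    ∀ r : List Int, r.length = n →
      (row.foldl bump r).getD k 0 =
        r.getD k 0 + ((row.countP (fun j => NormI n j = k)) : Int) := by
  intro row
  induction row with
  | nil => intro _ r _; simp
  | cons j row ih =>
      intro hrow r hr
      have hj := hrow j (List.mem_cons_self ..)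
      have h1 : -(r.length : Int) ≤ j := by rw [hr]; exact hj.1
      have h2 : j < r.length := by rw [hr]; exact hj.2
      rw [List.foldl_cons]
      have hbump : bump r j = r.set (NormI n j) (r.getD (NormI n j) 0 + 1) := by
        unfold bump
        rw [pySetD_norm r j _ h1 h2, pyGetD_norm r j h1 h2, hr]
      rw [hbump, ih (fun x hx => hrow x (List.mem_cons_of_mem j hx)) _ (by simp [hr])]
      have hN : NormI n j < n := by
        have := NormI_lt n j hj.1 hj.2
        exact this
      have hgd : (r.set (NormI n j) (r.getD (NormI n j) 0 + 1)).getD k 0 =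
          if NormI n j = k then r.getD k 0 + 1 else r.getD k 0 := by
        by_cases h : NormI n j = k
        · rw [if_pos h, ← h]
          have hlt : NormI n j < r.length := by rw [hr]; exact hN
          simp [List.getD_eq_getElem?_getD, hlt]
        · rw [if_neg h]
          simp [List.getD_eq_getElem?_getD, h]
      rw [hgd, List.countP_cons]
      by_cases h : NormI n j = k
      · rw [if_pos h]
        simp [h]
        ring
      · rw [if_neg h]
        simp [h]

-- entry (i, k) of the built matrix counts occurrences of k among normalised indices of adjacency[i]
lemma entry_buildMat (adj : List (List Int)) (hR : InRangeAdj adj) (i k : Nat)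
    (hi : i < adj.length) :
    ((buildMat adj adj.length).getD i []).getD k 0 =
      ((adj[i].countP (fun j => NormI adj.length j = k)) : Int) := by
  have hrow : PySem.List.pyGet? adj (i : Int) = some adj[i] := by
    rw [PySem.List.pyGet?_natCast]
    simp [hi]
  rw [getD_buildMat adj adj.length i hi, hrow]
  show (adj[i].foldl bump (List.replicate adj.length 0)).getD k 0 = _
  rw [getD_bumpFold adj.length k adj[i]
    (fun j hj => hR adj[i] (List.getElem_mem hi) j hj) _ (by simp)]
  simp

-- list sum of values at normalised indices = count-weighted sum
lemma sum_map_norm_eq_count (n : Nat) (f : Nat → Int) :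
    ∀ (row : List Int), (∀ j ∈ row, -(n : Int) ≤ j ∧ j < n) →
      (row.map (fun j => f (NormI n j))).sum =
        ∑ k ∈ Finset.range n, ((row.countP (fun j => NormI n j = k)) : Int) * f k := by
  intro row
  induction row with
  | nil => simp
  | cons j row ih =>
      intro hrow
      have hj := hrow j (List.mem_cons_self ..)
      have hN : NormI n j < n := NormI_lt n j hj.1 hj.2
      rw [List.map_cons, List.sum_cons, ih (fun x hx => hrow x (List.mem_cons_of_mem j hx))]
      have hsplit : ∀ k ∈ Finset.range n,
          (((j :: row).countP (fun x => NormI n x = k)) : Int) * f k =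
            ((row.countP (fun x => NormI n x = k)) : Int) * f k +
              (if NormI n j = k then f k else 0) := by
        intro k _
        rw [List.countP_cons]
        by_cases h : NormI n j = k
        · simp [h]; ring
        · simp [h]
      rw [Finset.sum_congr rfl hsplit, Finset.sum_add_distrib, Finset.sum_ite_eq]
      rw [if_pos (Finset.mem_range.mpr hN)]
      ring

-- gg's recurrence through the count matrix
lemma gg_succ_count (adj : List (List Int)) (hR : InRangeAdj adj) (t : Nat) (i : Nat)
    (hi : i < adj.length) :
    gg adj (t + 1) (i : Int) =
      ∑ k ∈ Finset.range adj.length,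
        ((adj[i].countP (fun j => NormI adj.length j = k)) : Int) * gg adj t (k : Int) := by
  have hrow : PySem.List.pyGet? adj (i : Int) = some adj[i] := by
    rw [PySem.List.pyGet?_natCast]
    simp [hi]
  show ((PySem.List.pyGet? adj (i : Int)).getD []).foldl (fun s j => s + gg adj t j) 0 = _
  rw [hrow]
  show adj[i].foldl (fun s j => s + gg adj t j) 0 = _
  rw [PySem.List.foldl_add _ (fun j => gg adj t j) 0, zero_add]
  have hmem : ∀ j ∈ adj[i], -(adj.length : Int) ≤ j ∧ j < adj.length :=
    fun j hj => hR adj[i] (List.getElem_mem hi) j hj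
  have hcong : adj[i].map (fun j => gg adj t j) =
      adj[i].map (fun j => gg adj t (NormI adj.length j : Int)) := by
    apply List.map_congr_left
    intro j hj
    exact gg_norm adj t j (hmem j hj).1 (hmem j hj).2
  rw [hcong, sum_map_norm_eq_count adj.length (fun k => gg adj t (k : Int)) adj[i] hmem]

-- row sums of powers of the count matrix are the gg values
lemma rowSum_pow (adj : List (List Int)) (hR : InRangeAdj adj) :
    ∀ (e : Nat) (i : Fin adj.length),
      (∑ c : Fin adj.length, ((toMat adj.length (buildMat adj adj.length)) ^ e) i c) =
        gg adj e (i : Int) := by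
  intro e
  induction e with
  | zero =>
      intro i
      simp [Matrix.one_apply]
      rfl
  | succ e ih =>
      intro i
      rw [pow_succ']
      have hswap : (∑ c : Fin adj.length,
          (toMat adj.length (buildMat adj adj.length) *
            (toMat adj.length (buildMat adj adj.length)) ^ e) i c) =
          ∑ k : Fin adj.length, toMat adj.length (buildMat adj adj.length) i k *
            ∑ c : Fin adj.length, ((toMat adj.length (buildMat adj adj.length)) ^ e) k c := by
        simp only [Matrix.mul_apply]
        rw [Finset.sum_comm]
        apply Finset.sum_congr rfl
        intro k _
        rw [Finset.mul_sum]
      rw [hswap]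
      have hent : ∀ k : Fin adj.length,
          toMat adj.length (buildMat adj adj.length) i k =
            ((adj[(i : Nat)].countP (fun j => NormI adj.length j = (k : Nat))) : Int) := by
        intro k
        exact entry_buildMat adj hR i k i.isLt
      calc (∑ k : Fin adj.length, toMat adj.length (buildMat adj adj.length) i k *
              ∑ c : Fin adj.length, ((toMat adj.length (buildMat adj adj.length)) ^ e) k c)
          = ∑ k : Fin adj.length,
              ((adj[(i : Nat)].countP (fun j => NormI adj.length j = (k : Nat))) : Int) *
                gg adj e (k : Int) := by
            apply Finset.sum_congr rfl
            intro k _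
            rw [hent k, ih k]
        _ = ∑ k ∈ Finset.range adj.length,
              ((adj[(i : Nat)].countP (fun j => NormI adj.length j = k)) : Int) *
                gg adj e (k : Int) := by
            exact Fin.sum_univ_eq_sum_range
              (fun k => ((adj[(i : Nat)].countP (fun j => NormI adj.length j = k)) : Int) *
                gg adj e (k : Int)) adj.length
        _ = gg adj (e + 1) (i : Int) := (gg_succ_count adj hR e i i.isLt).symm

-- ---------- assembling B ----------

lemma sum_eq_getD_sum (w : List Int) :
    w.foldl (fun acc x => acc + x) 0 = ∑ k ∈ Finset.range w.length, w.getD k 0 := by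
  rw [PySem.List.foldl_add w (fun x => x) 0, zero_add, List.map_id']
  induction w with
  | nil => simp
  | cons a tl ih =>
      rw [List.sum_cons, List.length_cons, Finset.sum_range_succ', ih]
      simp
      ring

lemma sum_map_getD {f : List Int → Int} :
    ∀ (p : List (List Int)),
      (p.map f).sum = ((List.range p.length).map (fun i => f (p.getD i []))).sum := by
  intro p
  induction p with
  | nil => simp
  | cons a p ih =>
      rw [List.map_cons, List.sum_cons, ih, List.length_cons, List.range_succ_eq_map]
      rw [List.map_cons, List.sum_cons, List.map_map]
      rfl

lemma calc_ways_alt_closed (adj : List (List Int)) (h_ : Int) (hR : InRangeAdj adj)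
    (hgt : ¬ h_ ≤ 1) :
    calc_ways_alt adj h_ =
      ∑ i ∈ Finset.range adj.length, gg adj (h_ - 1).toNat (i : Int) := by
  show (if h_ ≤ 1 then ((adj.length : Int)) else _) = _
  rw [if_neg hgt]
  set n := adj.length with hn
  set P := powLoop n (idL n) (buildMat adj n) (h_ - 1).toNat with hP
  have hshape := shape_powLoop n (h_ - 1).toNat (idL n) (buildMat adj n)
    (length_idL n) (rows_idL n)
  have hPlen : P.length = n := hshape.1
  have hProws : ∀ r ∈ P, r.length = n := hshape.2
  have htm : toMat n P = (toMat n (buildMat adj n)) ^ (h_ - 1).toNat := by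
    rw [hP, toMat_powLoop n (h_ - 1).toNat (idL n) (buildMat adj n)
      (length_idL n) (length_buildMat adj n), toMat_idL, one_mul]
  show P.foldl (fun s row => s + row.foldl (fun a x => a + x) 0) 0 = _
  rw [PySem.List.foldl_add P (fun row => row.foldl (fun a x => a + x) 0) 0, zero_add]
  rw [sum_map_getD, sum_map_range, hPlen]
  have hrow : ∀ i ∈ Finset.range n,
      (P.getD i []).foldl (fun a x => a + x) 0 =
        ∑ c ∈ Finset.range n, (P.getD i []).getD c 0 := by
    intro i hi
    have hlen : (P.getD i []).length = n := by
      have him : i < P.length := by rw [hPlen]; exact Finset.mem_range.mp hi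
      rw [List.getD_eq_getElem?_getD, List.getElem?_eq_getElem him]
      exact hProws _ (List.getElem_mem him)
    rw [sum_eq_getD_sum, hlen]
  rw [Finset.sum_congr rfl hrow]
  have hfin : ∀ i ∈ Finset.range n,
      (∑ c ∈ Finset.range n, (P.getD i []).getD c 0) = gg adj (h_ - 1).toNat (i : Int) := by
    intro i hi
    have him : i < n := Finset.mem_range.mp hi
    have : (∑ c ∈ Finset.range n, (P.getD i []).getD c 0) =
        ∑ c : Fin n, toMat n P ⟨i, him⟩ c := by
      rw [← Fin.sum_univ_eq_sum_range (fun c => (P.getD i []).getD c 0) n]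
      rfl
    rw [this, htm]
    exact rowSum_pow adj hR (h_ - 1).toNat ⟨i, him⟩
  exact Finset.sum_congr rfl hfin

-- ===== VERDICT (by name: the statement is the Claim_ definition above) =====
theorem calc_ways_spec : Claim_equal_calc_ways := by
  intro adj h_ _ hpre
  unfold Spec_calc_ways
  by_cases hle : h_ ≤ 1
  · show calc_ways adj h_ = (if h_ ≤ 1 then ((adj.length : Int)) else _)
    rw [if_pos hle, calc_ways_eq_loop, PySem.List.pyRange_one_eq_nil (by omega)]
    show (adj.map fun _ => (1 : Int)).foldl (fun acc x => acc + x) 0 = _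
    rw [sum_eq_getD_sum]
    have hmap : adj.map (fun _ => (1 : Int)) = List.replicate adj.length 1 := by
      simp [List.map_const']
    rw [hmap, List.length_replicate]
    have hone : ∀ k ∈ Finset.range adj.length, (List.replicate adj.length (1 : Int)).getD k 0 = 1 := by
      intro k hk
      rw [List.getD_eq_getElem?_getD, List.getElem?_replicate, if_pos (Finset.mem_range.mp hk)]
      rfl
    rw [Finset.sum_congr rfl hone, Finset.sum_const, Finset.card_range]
    simp
  · rcases hpre with h | hR
    · exact absurd h hle
    · rw [calc_ways_closed adj h_ hR, calc_ways_alt_closed adj h_ hR hle,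
        PySem.List.length_pyRange_one]
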